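-- pv_equiv track=rewrite | github.com/juajang/algorithm | Etc/숫자 게임.py | solution
-- ===== SOURCE A (Python) =====
-- def solution(A, B):
--     answer = 0
--
--     A.sort()
--     B.sort()
--     N = len(A)
--
--     j = 0
--     for i in range(N):
--         while j < N and A[i] >= B[j]:
--             j += 1
--         if j < N and A[i] < B[j]:
--             answer += 1
--             j += 1
--
--     return answer
-- ===== SOURCE B (Python) =====
-- def solution(A, B):
--     # Merged-sweep re-implementation: sort A and B in place (keeping the
--     # original's observable in-place sorting), tag each B value as (v, 0)
--     # and each A value as (v, 1), stably sort the tagged values by value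
--     # (B entries first, so at equal value the B entry precedes the A entry
--     # and a B value only beats strictly smaller A values), then sweep once
--     # with an availability counter.  As in the original, only the len(A)
--     # smallest values of B take part.
--     A.sort()
--     B.sort()
--     merged = sorted([(b, 0) for b in B[:len(A)]] + [(a, 1) for a in A],
--                     key=lambda p: p[0])
--     answer = 0
--     avail = 0
--     for _, tag in merged:
--         if tag == 1:
--             avail += 1
--         elif avail > 0:
--             avail -= 1
--             answer += 1
--     return answer
-- ===== Notes on version B (the rewrite author's own statement) =====
-- stated objective: alternative
-- what changed: Replaces the two synchronized index pointers (outer for over A, inner while over B) with a single stably-sorted merged stream of tagged values swept once with an availability counter.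
import Mathlib
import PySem

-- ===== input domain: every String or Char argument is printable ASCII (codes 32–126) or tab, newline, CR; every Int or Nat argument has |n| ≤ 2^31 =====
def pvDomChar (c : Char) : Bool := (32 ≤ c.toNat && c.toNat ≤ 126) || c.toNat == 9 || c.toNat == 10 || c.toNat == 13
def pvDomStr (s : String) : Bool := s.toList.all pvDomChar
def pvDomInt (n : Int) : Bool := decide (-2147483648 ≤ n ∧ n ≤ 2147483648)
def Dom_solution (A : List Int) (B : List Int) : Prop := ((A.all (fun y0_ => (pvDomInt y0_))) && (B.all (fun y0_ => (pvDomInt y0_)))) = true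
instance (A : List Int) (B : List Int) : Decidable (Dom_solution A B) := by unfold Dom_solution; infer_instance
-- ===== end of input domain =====

-- B replaces A's two synchronized index pointers by one stably-sorted tagged
-- value stream swept once with an availability counter (objective: alternative,
-- same O(n log n) cost).  Both versions sort their arguments in place; the
-- equivalence proved here is about the return value.

-- ===== PORT A =====
-- inner loop 'while j < N and A[i] >= B[j]: j += 1'
def solutionSkip (sB : List Int) (N : Int) (ai : Int) (j : Int) : Int :=
  if h : j < N ∧ PySem.List.pyGetD sB j 0 ≤ ai then solutionSkip sB N ai (j + 1) else j
termination_by (N - j).toNat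
decreasing_by omega

def solution (A : List Int) (B : List Int) : Int :=
  let sA := PySem.List.sorted A (fun x => x) false
  let sB := PySem.List.sorted B (fun x => x) false
  let N : Int := PySem.List.len sA
  (((PySem.List.pyRange 0 N 1).foldl (fun (st : Int × Int) (i : Int) =>
      let ai := PySem.List.pyGetD sA i 0
      let j := solutionSkip sB N ai st.1
      if j < N ∧ ai < PySem.List.pyGetD sB j 0 then (j + 1, st.2 + 1) else (j, st.2))
    (0, 0)).2)

-- ===== PORT B =====
def solution_alt (A : List Int) (B : List Int) : Int :=
  let sA := PySem.List.sorted A (fun x => x) false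
  let sB := PySem.List.sorted B (fun x => x) false
  let merged := PySem.List.sorted
      ((PySem.List.slice sB none (some (PySem.List.len sA))).map (fun b => (b, (0 : Int)))
        ++ sA.map (fun a => (a, (1 : Int))))
      (fun p => p.1) false
  (merged.foldl (fun (st : Int × Int) (p : Int × Int) =>
      if p.2 == 1 then (st.1, st.2 + 1)
      else if st.2 > 0 then (st.1 + 1, st.2 - 1) else st)
    (0, 0)).1

-- ===== PRECONDITION & SPEC =====
-- Pre_ excludes exactly the inputs with len(B) < len(A), on which A always
-- raises IndexError (evaluating B[j] at j == len(B)); A returns on every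
-- input with len(A) ≤ len(B).
def Pre_solution (A : List Int) (B : List Int) : Prop := A.length ≤ B.length
instance (A : List Int) (B : List Int) : Decidable (Pre_solution A B) := by unfold Pre_solution; infer_instance
def pvWitness_solution : List Int × List Int := ([1, 2], [2, 3])


def Spec_solution (A : List Int) (B : List Int) (out : Int) : Prop := out = solution_alt A B
instance (A : List Int) (B : List Int) (out : Int) : Decidable (Spec_solution A B out) := by unfold Spec_solution; infer_instance

-- ===== CLAIM (what is proved, stated in full; the proofs are below) =====
def Claim_equal_solution : Prop := ∀ (A : List Int) (B : List Int), Dom_solution A B → Pre_solution A B → Spec_solution A B (solution A B)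

-- ===== LEMMAS AND PROOFS =====

-- the merge of the two sorted tagged streams, B entries first at equal value
def mergeT : List Int → List Int → List (Int × Int)
  | [], bs => bs.map (fun b => (b, (0 : Int)))
  | as, [] => as.map (fun a => (a, (1 : Int)))
  | a :: as, b :: bs =>
    if b ≤ a then (b, 0) :: mergeT (a :: as) bs else (a, 1) :: mergeT as (b :: bs)
termination_by as bs => as.length + bs.length

-- A-style greedy with k "wildcard" A-entries any B value may match
def G : List Int → List Int → Int → Int
  | _, [], _ => 0
  | [], _ :: bs, k => if 0 < k then 1 + G [] bs (k - 1) else G [] bs k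
  | a :: as, b :: bs, k =>
    if b ≤ a then (if 0 < k then 1 + G (a :: as) bs (k - 1) else G (a :: as) bs k)
    else 1 + G as bs k
termination_by as bs _ => as.length + bs.length

-- the merged sweep, recursively on the two sorted streams
def S : List Int → List Int → Int → Int
  | _, [], _ => 0
  | [], _ :: bs, k => if 0 < k then 1 + S [] bs (k - 1) else S [] bs k
  | a :: as, b :: bs, k =>
    if b ≤ a then (if 0 < k then 1 + S (a :: as) bs (k - 1) else S (a :: as) bs k)
    else S as (b :: bs) (k + 1)
termination_by as bs _ => as.length + bs.length

-- the sweep's fold, as a recursion over the merged list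
def F : List (Int × Int) → Int → Int
  | [], _ => 0
  | p :: r, k => if p.2 == 1 then F r (k + 1) else if 0 < k then 1 + F r (k - 1) else F r k

lemma F_foldl (l : List (Int × Int)) : ∀ st : Int × Int,
    (l.foldl (fun (st : Int × Int) (p : Int × Int) =>
      if p.2 == 1 then (st.1, st.2 + 1)
      else if st.2 > 0 then (st.1 + 1, st.2 - 1) else st) st).1 = st.1 + F l st.2 := by
  induction l with
  | nil => intro st; simp [F]
  | cons p r ih =>
    intro st
    by_cases h1 : p.2 == 1
    · rw [List.foldl_cons, if_pos h1, ih]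
      simp [F, h1]
    · by_cases h2 : st.2 > 0
      · rw [List.foldl_cons, if_neg h1, if_pos h2, ih]
        simp [F, h1, h2]
        ring
      · rw [List.foldl_cons, if_neg h1, if_neg h2, ih]
        simp [F, h1, h2]

lemma F_tag1 (as : List Int) : ∀ k, F (as.map (fun a => (a, (1 : Int)))) k = 0 := by
  induction as with
  | nil => intro k; simp [F]
  | cons a as ih => intro k; simp [F, ih]

lemma F_tag0 (bs : List Int) : ∀ k, F (bs.map (fun b => (b, (0 : Int)))) k = S [] bs k := by
  induction bs with
  | nil => intro k; simp [F, S]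
  | cons b bs ih => intro k; by_cases h : 0 < k <;> simp [F, S, h, ih]

lemma F_mergeT : ∀ n (as bs : List Int) (k : Int), as.length + bs.length ≤ n →
    F (mergeT as bs) k = S as bs k := by
  intro n
  induction n with
  | zero =>
    intro as bs k h
    cases as with
    | nil => simpa [mergeT] using F_tag0 bs k
    | cons a as => simp at h
  | succ n ih =>
    intro as bs k h
    cases as with
    | nil => simpa [mergeT] using F_tag0 bs k
    | cons a as =>
      cases bs with
      | nil => simpa [mergeT, S] using F_tag1 (a :: as) k
      | cons b bs =>
        simp only [List.length_cons] at h
        by_cases hba : b ≤ a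
        · by_cases hk : 0 < k
          · simp [mergeT, hba, F, S, hk, ih (a :: as) bs (k - 1) (by simp; omega)]
          · simp [mergeT, hba, F, S, hk, ih (a :: as) bs k (by simp; omega)]
        · simp [mergeT, hba, F, S, ih as (b :: bs) (k + 1) (by simp; omega)]

-- the exchange lemmas: a positive wildcard pool absorbs the smallest B value,
-- and an A value below every remaining B value is exactly one wildcard
lemma G_exchange : ∀ n : Nat,
    (∀ (as bs : List Int) (b k : Int), as.length + bs.length + 1 ≤ n →
      (b :: bs).Pairwise (· ≤ ·) → 0 ≤ k → G as (b :: bs) (k + 1) = 1 + G as bs k) ∧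
    (∀ (a : Int) (as bs : List Int) (k : Int), as.length + bs.length + 1 ≤ n →
      bs.Pairwise (· ≤ ·) → (∀ x ∈ bs, a < x) → 0 ≤ k → G (a :: as) bs k = G as bs (k + 1)) := by
  intro n
  induction n with
  | zero =>
    exact ⟨fun as bs b k hlen _ _ => by simp at hlen,
      fun a as bs k hlen _ _ _ => by simp at hlen⟩
  | succ n ih =>
    constructor
    · intro as bs b k hlen hpw hk
      cases as with
      | nil => simp [G, show (0:Int) < k + 1 by omega]
      | cons a' as' =>
        simp only [List.length_cons] at hlen
        by_cases hba : b ≤ a'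
        · simp [G, hba, show (0:Int) < k + 1 by omega]
        · have hab : a' < b := by omega
          rw [show G (a' :: as') (b :: bs) (k + 1) = 1 + G as' bs (k + 1) by
            simp [G, hba]]
          have hx := (ih.2) a' as' bs k (by omega)
            (hpw.sublist (List.sublist_cons_self b bs))
            (fun x hx => lt_of_lt_of_le hab ((List.pairwise_cons.mp hpw).1 x hx)) hk
          rw [← hx]
    · intro a as bs k hlen hpw hgt hk
      cases bs with
      | nil => simp [G]
      | cons b' bs' =>
        simp only [List.length_cons] at hlen
        have hab : a < b' := hgt b' (by simp)
        rw [show G (a :: as) (b' :: bs') k = 1 + G as bs' k by simp [G, show ¬ b' ≤ a by omega]]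
        have hw := (ih.1) as bs' b' k (by omega) hpw hk
        rw [hw]

lemma S_eq_G : ∀ n (as bs : List Int) (k : Int), as.length + bs.length ≤ n →
    bs.Pairwise (· ≤ ·) → 0 ≤ k → S as bs k = G as bs k := by
  intro n
  induction n with
  | zero =>
    intro as bs k h _ _
    cases bs with
    | nil => simp [S, G]
    | cons b bs => simp at h
  | succ n ih =>
    intro as bs k h hpw hk
    cases bs with
    | nil => simp [S, G]
    | cons b bs =>
      have hbs : bs.Pairwise (· ≤ ·) := hpw.sublist (List.sublist_cons_self b bs)
      cases as with
      | nil =>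
        simp only [List.length_nil, List.length_cons] at h
        by_cases hc : 0 < k
        · simp [S, G, hc, ih [] bs (k - 1) (by simp; omega) hbs (by omega)]
        · simp [S, G, hc, ih [] bs k (by simp; omega) hbs hk]
      | cons a as =>
        simp only [List.length_cons] at h
        by_cases hba : b ≤ a
        · by_cases hc : 0 < k
          · simp [S, G, hba, hc, ih (a :: as) bs (k - 1) (by simp; omega) hbs (by omega)]
          · simp [S, G, hba, hc, ih (a :: as) bs k (by simp; omega) hbs hk]
        · rw [show S (a :: as) (b :: bs) k = S as (b :: bs) (k + 1) by simp [S, hba],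
            ih as (b :: bs) (k + 1) (by simp; omega) hpw (by omega),
            (G_exchange (as.length + bs.length + 1)).1 as bs b k (by omega) hpw hk]
          simp [G, hba]

-- inserting the largest A value into a merge appends it after every value ≤ it
lemma mergeT_append : ∀ n (as bs : List Int) (m : Int), as.length + bs.length ≤ n →
    (∀ x ∈ as, x ≤ m) →
    mergeT (as ++ [m]) bs
      = PySem.List.insertBy (fun p q : Int × Int => decide (p.1 < q.1)) (m, 1) (mergeT as bs) := by
  intro n
  induction n with
  | zero =>
    intro as bs m h _
    cases as with
    | nil =>
      cases bs with
      | nil => simp [mergeT, PySem.List.insertBy]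
      | cons b bs => simp at h
    | cons a as => simp at h
  | succ n ih =>
    intro as bs m h hle
    cases as with
    | nil =>
      cases bs with
      | nil => simp [mergeT, PySem.List.insertBy]
      | cons b bs =>
        simp only [List.length_nil, List.length_cons] at h
        by_cases hbm : b ≤ m
        · rw [show ([] : List Int) ++ [m] = [m] by simp] at *
          rw [show mergeT [m] (b :: bs) = (b, 0) :: mergeT [m] bs by simp [mergeT, hbm],
            show mergeT ([] : List Int) (b :: bs) = (b, 0) :: mergeT [] bs by simp [mergeT]]
          rw [show PySem.List.insertBy (fun p q : Int × Int => decide (p.1 < q.1)) (m, 1)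
                ((b, 0) :: mergeT [] bs)
              = (b, 0) :: PySem.List.insertBy (fun p q : Int × Int => decide (p.1 < q.1)) (m, 1)
                (mergeT [] bs) by
            simp [PySem.List.insertBy, show ¬ m < b by omega]]
          have := ih [] bs m (by simp; omega) (by simp)
          simp only [List.nil_append] at this
          rw [this]
        · rw [show ([] : List Int) ++ [m] = [m] by simp]
          rw [show mergeT [m] (b :: bs) = (m, 1) :: mergeT [] (b :: bs) by
            simp [mergeT, hbm]]
          rw [show mergeT ([] : List Int) (b :: bs) = (b, 0) :: mergeT [] bs by simp [mergeT]]
          simp [PySem.List.insertBy, show m < b by omega, mergeT]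
    | cons a as =>
      have ham : a ≤ m := hle a (by simp)
      simp only [List.length_cons] at h
      cases bs with
      | nil =>
        rw [PySem.List.insertBy_of_forall_not_before _ _ _ (fun y hy => by
          rw [show mergeT (a :: as) [] = (a :: as).map (fun x => (x, (1 : Int))) from by
            simp [mergeT]] at hy
          obtain ⟨x, hx, rfl⟩ := List.mem_map.mp hy
          simp only [decide_eq_false_iff_not, not_lt]
          exact hle x hx)]
        simp [mergeT]
      | cons b bs =>
        simp only [List.length_cons] at h
        by_cases hba : b ≤ a
        · rw [show (a :: as) ++ [m] = a :: (as ++ [m]) by simp,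
            show mergeT (a :: (as ++ [m])) (b :: bs) = (b, 0) :: mergeT (a :: (as ++ [m])) bs by
              simp [mergeT, hba],
            show mergeT (a :: as) (b :: bs) = (b, 0) :: mergeT (a :: as) bs by
              simp [mergeT, hba]]
          rw [show PySem.List.insertBy (fun p q : Int × Int => decide (p.1 < q.1)) (m, 1)
                ((b, 0) :: mergeT (a :: as) bs)
              = (b, 0) :: PySem.List.insertBy (fun p q : Int × Int => decide (p.1 < q.1)) (m, 1)
                (mergeT (a :: as) bs) by
            simp [PySem.List.insertBy, show ¬ m < b by omega]]
          have := ih (a :: as) bs m (by simp; omega) hle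
          rw [show (a :: as) ++ [m] = a :: (as ++ [m]) by simp] at this
          rw [this]
        · rw [show (a :: as) ++ [m] = a :: (as ++ [m]) by simp,
            show mergeT (a :: (as ++ [m])) (b :: bs) = (a, 1) :: mergeT (as ++ [m]) (b :: bs) by
              simp [mergeT, hba],
            show mergeT (a :: as) (b :: bs) = (a, 1) :: mergeT as (b :: bs) by
              simp [mergeT, hba]]
          rw [show PySem.List.insertBy (fun p q : Int × Int => decide (p.1 < q.1)) (m, 1)
                ((a, 1) :: mergeT as (b :: bs))
              = (a, 1) :: PySem.List.insertBy (fun p q : Int × Int => decide (p.1 < q.1)) (m, 1)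
                (mergeT as (b :: bs)) by
            simp [PySem.List.insertBy, show ¬ m < a by omega]]
          rw [ih as (b :: bs) m (by simp; omega) (fun x hx => hle x (by simp [hx]))]

lemma foldl_ins_sorted : ∀ (l acc : List (Int × Int)),
    l.Pairwise (fun p q => p.1 ≤ q.1) → (∀ x ∈ l, ∀ y ∈ acc, y.1 ≤ x.1) →
    l.foldl (fun acc x => PySem.List.insertBy (fun p q : Int × Int => decide (p.1 < q.1)) x acc) acc
      = acc ++ l := by
  intro l
  induction l with
  | nil => intro acc _ _; simp
  | cons x l ih =>
    intro acc hpw hge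
    rw [List.foldl_cons, PySem.List.insertBy_of_forall_not_before _ _ _ (fun y hy => by
      simp only [decide_eq_false_iff_not, not_lt]
      exact hge x (by simp) y hy)]
    rw [ih (acc ++ [x]) (hpw.sublist (List.sublist_cons_self x l)) (fun z hz y hy => by
      rcases List.mem_append.mp hy with hy' | hy'
      · exact hge z (by simp [hz]) y hy'
      · have : y = x := by simpa using hy'
        subst this
        exact (List.pairwise_cons.mp hpw).1 z hz)]
    simp

lemma foldl_ins_tag1 : ∀ (as : List Int), as.Pairwise (· ≤ ·) → ∀ (bs : List Int),
    (as.map (fun a => (a, (1 : Int)))).foldl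
        (fun acc x => PySem.List.insertBy (fun p q : Int × Int => decide (p.1 < q.1)) x acc)
        (bs.map (fun b => (b, (0 : Int))))
      = mergeT as bs := by
  intro as
  induction as using List.reverseRecOn with
  | nil => intro _ bs; simp [mergeT]
  | append_singleton as m ih =>
    intro hpw bs
    have hparts := List.pairwise_append.mp hpw
    rw [List.map_append, List.foldl_append, ih hparts.1 bs]
    simp only [List.map_cons, List.map_nil, List.foldl_cons, List.foldl_nil]
    exact (mergeT_append (as.length + bs.length) as bs m le_rfl
      (fun x hx => hparts.2.2 x hx m (by simp))).symm

lemma sorted_tagged_eq_mergeT (as bs : List Int) (ha : as.Pairwise (· ≤ ·))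
    (hb : bs.Pairwise (· ≤ ·)) :
    PySem.List.sorted (bs.map (fun b => (b, (0 : Int))) ++ as.map (fun a => (a, (1 : Int))))
        (fun p => p.1) false
      = mergeT as bs := by
  rw [PySem.List.sorted_eq_foldl_insertBy, List.foldl_append]
  rw [foldl_ins_sorted (bs.map (fun b => (b, (0 : Int)))) []
    (List.pairwise_map.mpr (by simpa using hb)) (fun x _ y hy => by simp at hy)]
  rw [List.nil_append]
  exact foldl_ins_tag1 as ha bs

lemma G_nil_zero : ∀ bs : List Int, G [] bs 0 = 0 := by
  intro bs
  induction bs with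
  | nil => simp [G]
  | cons b bs ih => simp [G, ih]

-- the while loop: skipping B values ≤ ai, and its effect on G
lemma solutionSkip_spec (sB : List Int) (N : Int) (hNB : N.toNat ≤ sB.length) (ai : Int) :
    ∀ (fuel : Nat) (j : Int), (N - j).toNat ≤ fuel → 0 ≤ j → j ≤ N →
      0 ≤ solutionSkip sB N ai j ∧ j ≤ solutionSkip sB N ai j ∧ solutionSkip sB N ai j ≤ N ∧
      (solutionSkip sB N ai j < N → ai < PySem.List.pyGetD sB (solutionSkip sB N ai j) 0) ∧
      ∀ rest, G (ai :: rest) ((sB.take N.toNat).drop j.toNat) 0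
        = G (ai :: rest) ((sB.take N.toNat).drop (solutionSkip sB N ai j).toNat) 0 := by
  intro fuel
  induction fuel with
  | zero =>
    intro j hf h0 hN
    rw [solutionSkip, dif_neg (by omega)]
    exact ⟨h0, le_rfl, hN, fun h => absurd h (by omega), fun rest => rfl⟩
  | succ fuel ih =>
    intro j hf h0 hjN
    by_cases hc : j < N ∧ PySem.List.pyGetD sB j 0 ≤ ai
    · rw [solutionSkip, dif_pos hc]
      obtain ⟨r0, rle, rN, rval, rG⟩ := ih (j + 1) (by omega) (by omega) (by omega)
      refine ⟨r0, by omega, rN, rval, fun rest => ?_⟩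
      rw [← rG rest]
      have hjlt : j.toNat < ((sB.take N.toNat)).length := by
        rw [List.length_take]
        omega
      rw [List.drop_eq_getElem_cons hjlt]
      have hbj : (sB.take N.toNat)[j.toNat] = PySem.List.pyGetD sB j 0 := by
        rw [List.getElem_take,
          PySem.List.pyGetD_eq_getElem sB 0 h0 (by rw [List.length_take] at hjlt; omega)]
      rw [show (j + 1).toNat = j.toNat + 1 by omega]
      simp [G, hbj, hc.2]
    · rw [solutionSkip, dif_neg hc]
      refine ⟨h0, le_rfl, hjN, fun hlt => ?_, fun rest => rfl⟩
      rcases not_and_or.mp hc with h | h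
      · exact absurd hlt h
      · omega

-- one step of the outer loop, named so the fold can be rewritten
def stepA (sA sB : List Int) (N : Int) (st : Int × Int) (i : Int) : Int × Int :=
  let ai := PySem.List.pyGetD sA i 0
  let j := solutionSkip sB N ai st.1
  if j < N ∧ ai < PySem.List.pyGetD sB j 0 then (j + 1, st.2 + 1) else (j, st.2)

lemma foldl_outer (sA sB : List Int) (N : Int) (hN : N = (sA.length : Int))
    (hlen : sA.length ≤ sB.length) :
    ∀ (fuel : Nat) (i j ans : Int), (N - i).toNat ≤ fuel → 0 ≤ i → i ≤ N → 0 ≤ j → j ≤ N →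
      ((PySem.List.pyRange i N 1).foldl (stepA sA sB N) (j, ans)).2
        = ans + G (sA.drop i.toNat) ((sB.take N.toNat).drop j.toNat) 0 := by
  intro fuel
  induction fuel with
  | zero =>
    intro i j ans hf h0i hiN h0j hjN
    have hi : i = N := by omega
    subst hi
    rw [show PySem.List.pyRange i i 1 = [] by simp [PySem.List.pyRange]]
    rw [show sA.drop i.toNat = [] from List.drop_eq_nil_of_le (by omega)]
    rw [G_nil_zero]
    simp
  | succ fuel ih =>
    intro i j ans hf h0i hiN h0j hjN
    by_cases hlt : i < N
    · rw [PySem.List.pyRange_one_cons hlt, List.foldl_cons]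
      have hNB : N.toNat ≤ sB.length := by omega
      obtain ⟨s0, sle, sN, sval, sG⟩ :=
        solutionSkip_spec sB N hNB (PySem.List.pyGetD sA i 0) (N - j).toNat j le_rfl h0j hjN
      have hitoN : i.toNat < sA.length := by omega
      have hdropA : sA.drop i.toNat = sA[i.toNat] :: sA.drop (i.toNat + 1) :=
        List.drop_eq_getElem_cons hitoN
      have hai : PySem.List.pyGetD sA i 0 = sA[i.toNat] :=
        PySem.List.pyGetD_eq_getElem sA 0 h0i (by omega)
      by_cases hif : solutionSkip sB N (PySem.List.pyGetD sA i 0) j < N ∧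
          PySem.List.pyGetD sA i 0 <
            PySem.List.pyGetD sB (solutionSkip sB N (PySem.List.pyGetD sA i 0) j) 0
      · rw [show stepA sA sB N (j, ans) i
            = (solutionSkip sB N (PySem.List.pyGetD sA i 0) j + 1, ans + 1) by
          simp only [stepA]
          rw [if_pos hif]]
        rw [ih (i + 1) (solutionSkip sB N (PySem.List.pyGetD sA i 0) j + 1) (ans + 1)
          (by omega) (by omega) (by omega) (by omega) (by omega)]
        rw [hdropA, ← hai, sG (sA.drop (i.toNat + 1))]
        have hjlt : (solutionSkip sB N (PySem.List.pyGetD sA i 0) j).toNat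
            < ((sB.take N.toNat)).length := by
          rw [List.length_take]
          omega
        rw [List.drop_eq_getElem_cons hjlt]
        have hbj : (sB.take N.toNat)[(solutionSkip sB N (PySem.List.pyGetD sA i 0) j).toNat]
            = PySem.List.pyGetD sB (solutionSkip sB N (PySem.List.pyGetD sA i 0) j) 0 := by
          rw [List.getElem_take,
            PySem.List.pyGetD_eq_getElem sB 0 s0 (by rw [List.length_take] at hjlt; omega)]
        rw [hbj]
        rw [show (solutionSkip sB N (PySem.List.pyGetD sA i 0) j + 1).toNat
            = (solutionSkip sB N (PySem.List.pyGetD sA i 0) j).toNat + 1 by omega,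
          show (i + 1).toNat = i.toNat + 1 by omega]
        rw [show G (PySem.List.pyGetD sA i 0 :: sA.drop (i.toNat + 1))
              ((PySem.List.pyGetD sB (solutionSkip sB N (PySem.List.pyGetD sA i 0) j) 0)
                :: (sB.take N.toNat).drop
                  ((solutionSkip sB N (PySem.List.pyGetD sA i 0) j).toNat + 1)) 0
            = 1 + G (sA.drop (i.toNat + 1))
                ((sB.take N.toNat).drop
                  ((solutionSkip sB N (PySem.List.pyGetD sA i 0) j).toNat + 1)) 0 by
          simp [G, show ¬ PySem.List.pyGetD sB (solutionSkip sB N (PySem.List.pyGetD sA i 0) j) 0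
              ≤ PySem.List.pyGetD sA i 0 by omega]]
        ring
      · have hjN : solutionSkip sB N (PySem.List.pyGetD sA i 0) j = N := by
          rcases not_and_or.mp hif with h | h
          · omega
          · by_cases hsN : solutionSkip sB N (PySem.List.pyGetD sA i 0) j < N
            · exact absurd (sval hsN) h
            · omega
        rw [show stepA sA sB N (j, ans) i
            = (solutionSkip sB N (PySem.List.pyGetD sA i 0) j, ans) by
          simp only [stepA]
          rw [if_neg hif]]
        rw [ih (i + 1) (solutionSkip sB N (PySem.List.pyGetD sA i 0) j) ans
          (by omega) (by omega) (by omega) (by omega) (by omega)]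
        rw [hdropA, ← hai, sG (sA.drop (i.toNat + 1)), hjN]
        rw [show (sB.take N.toNat).drop N.toNat = [] from
          List.drop_eq_nil_of_le (by rw [List.length_take]; omega)]
        rw [show (i + 1).toNat = i.toNat + 1 by omega]
        simp [G]
    · have hi : i = N := by omega
      subst hi
      rw [show PySem.List.pyRange i i 1 = [] by simp [PySem.List.pyRange]]
      rw [show sA.drop i.toNat = [] from List.drop_eq_nil_of_le (by omega)]
      rw [G_nil_zero]
      simp

-- ===== VERDICT (by name: the statement is the Claim_ definition above) =====
theorem solution_spec : Claim_equal_solution := by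
  intro A B _ hPre
  unfold Pre_solution at hPre
  unfold Spec_solution
  have hlA := PySem.List.length_sorted A (fun x => x) false
  have hlB := PySem.List.length_sorted B (fun x => x) false
  have hsAp : (PySem.List.sorted A (fun x => x) false).Pairwise (· ≤ ·) := by
    simpa using PySem.List.sorted_pairwise A (fun x => x)
  have hsBp : (PySem.List.sorted B (fun x => x) false).Pairwise (· ≤ ·) := by
    simpa using PySem.List.sorted_pairwise B (fun x => x)
  have hsBtp : ((PySem.List.sorted B (fun x => x) false).take A.length).Pairwise (· ≤ ·) :=
    hsBp.sublist (List.take_sublist ..)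
  rw [show solution A B
      = ((PySem.List.pyRange 0 (PySem.List.len (PySem.List.sorted A (fun x => x) false)) 1).foldl
          (stepA (PySem.List.sorted A (fun x => x) false) (PySem.List.sorted B (fun x => x) false)
            (PySem.List.len (PySem.List.sorted A (fun x => x) false))) (0, 0)).2 from rfl]
  rw [show solution_alt A B
      = ((PySem.List.sorted
            (((PySem.List.slice (PySem.List.sorted B (fun x => x) false) none
                (some (PySem.List.len (PySem.List.sorted A (fun x => x) false)))).map
                  (fun b => (b, (0 : Int))))
              ++ ((PySem.List.sorted A (fun x => x) false).map (fun a => (a, (1 : Int)))))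
            (fun p => p.1) false).foldl
          (fun (st : Int × Int) (p : Int × Int) =>
            if p.2 == 1 then (st.1, st.2 + 1)
            else if st.2 > 0 then (st.1 + 1, st.2 - 1) else st) (0, 0)).1 from rfl]
  rw [show PySem.List.len (PySem.List.sorted A (fun x => x) false) = ((A.length : Nat) : Int) by
    rw [PySem.List.len_eq, hlA]]
  rw [PySem.List.slice_to_natCast]
  rw [sorted_tagged_eq_mergeT (PySem.List.sorted A (fun x => x) false)
    ((PySem.List.sorted B (fun x => x) false).take A.length) hsAp hsBtp]
  rw [F_foldl]
  rw [F_mergeT ((PySem.List.sorted A (fun x => x) false).length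
      + ((PySem.List.sorted B (fun x => x) false).take A.length).length)
    (PySem.List.sorted A (fun x => x) false)
    ((PySem.List.sorted B (fun x => x) false).take A.length) 0 le_rfl]
  rw [S_eq_G ((PySem.List.sorted A (fun x => x) false).length
      + ((PySem.List.sorted B (fun x => x) false).take A.length).length)
    (PySem.List.sorted A (fun x => x) false)
    ((PySem.List.sorted B (fun x => x) false).take A.length) 0 le_rfl hsBtp (le_refl 0)]
  rw [foldl_outer (PySem.List.sorted A (fun x => x) false)
    (PySem.List.sorted B (fun x => x) false) ((A.length : Nat) : Int) (by rw [hlA]) (by omega)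
    ((A.length : Nat)) 0 0 0 (by omega) (by omega) (by omega) (by omega) (by omega)]
  simp
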